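-- pv_equiv track=rewrite | github.com/hugomosh/aoc-2024 | solutions/day_7.py | generate_ternary_numbers
-- ===== SOURCE A (Python) =====
-- def generate_ternary_numbers(n, length):
--     """Yields ternary numbers up to n-1, padded with trailing zeros to a specific length."""
--     for i in range(n):
--         ternary_num = ""
--         num = i
--         while num > 0:
--             ternary_num = str(num % 3) + ternary_num
--             num //= 3
--         yield ternary_num.zfill(length)
-- ===== SOURCE B (Python) =====
-- def generate_ternary_numbers(n, length):
--     """Yields ternary numbers up to n-1, padded with trailing zeros to a specific length.
--
--     Incremental ternary counter: keep the current digit characters (least-significant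
--     first) and add one with carry per step, instead of re-converting each i from
--     scratch with a division loop."""
--     digits = []  # ternary digit characters of the current value, least-significant first; [] is 0
--     for _ in range(n):
--         yield ''.join(reversed(digits)).zfill(length)
--         # add one with carry
--         i = 0
--         while i < len(digits) and digits[i] == '2':
--             digits[i] = '0'
--             i += 1
--         if i == len(digits):
--             digits.append('1')
--         else:
--             digits[i] = chr(ord(digits[i]) + 1)
-- ===== Notes on version B (the rewrite author's own statement) =====
-- stated objective: alternative
-- what changed: Instead of re-converting every i to ternary with a per-i division loop that prepends digits to a fresh string, B maintains one ternary digit list across iterations and adds one with carry per step; at the measured sizes both are dominated by building the zero-padded output strings.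
import Mathlib
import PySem

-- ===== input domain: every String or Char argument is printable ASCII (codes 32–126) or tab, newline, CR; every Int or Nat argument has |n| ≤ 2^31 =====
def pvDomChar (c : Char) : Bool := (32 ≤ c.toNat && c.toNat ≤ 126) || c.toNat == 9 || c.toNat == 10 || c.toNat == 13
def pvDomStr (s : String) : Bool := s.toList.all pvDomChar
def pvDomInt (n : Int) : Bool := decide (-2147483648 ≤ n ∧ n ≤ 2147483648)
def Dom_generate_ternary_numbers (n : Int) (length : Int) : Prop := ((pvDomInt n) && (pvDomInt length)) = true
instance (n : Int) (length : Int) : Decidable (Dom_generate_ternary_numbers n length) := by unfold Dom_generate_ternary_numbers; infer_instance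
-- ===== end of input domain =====

-- B replaces A's per-i base-3 re-conversion by one incremental ternary counter with carry (objective: alternative; same cost at scale, where padding dominates).

-- ===== PORT A =====
-- the `while num > 0` loop: prepend str(num % 3), then num //= 3
def pvTernA (num : Int) (acc : List Char) : List Char :=
  if h : 0 < num then
    pvTernA (PySem.Int.floordiv num 3) (PySem.Int.toChars (PySem.Int.mod num 3) ++ acc)
  else acc
termination_by num.toNat
decreasing_by
  have h2 : PySem.Int.floordiv num 3 = num / 3 := PySem.Int.floordiv_eq_ediv_of_pos (by omega)
  omega

def generate_ternary_numbers (n : Int) (length : Int) : List String :=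
  (PySem.List.pyRange 0 n 1).map (fun i =>
    String.ofList (PySem.Chars.zfill (pvTernA i []) length))

-- ===== PORT B =====
-- the `while … digits[i] == '2'` carry loop plus the final increment/append
def pvInc : List Char → List Char
  | [] => ['1']
  | d :: ds => if d = '2' then '0' :: pvInc ds else Char.ofNat (d.toNat + 1) :: ds

-- yield ''.join(reversed(digits)).zfill(length)
def pvRender (digits : List Char) (length : Int) : String :=
  String.ofList (PySem.Chars.zfill digits.reverse length)

def pvLoopB : Nat → List Char → Int → List String
  | 0, _, _ => []
  | k + 1, ds, length => pvRender ds length :: pvLoopB k (pvInc ds) length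

def generate_ternary_numbers_alt (n : Int) (length : Int) : List String :=
  pvLoopB n.toNat [] length

-- ===== PRECONDITION & SPEC =====
def Spec_generate_ternary_numbers (n : Int) (length : Int) (out : List String) : Prop := out = generate_ternary_numbers_alt n length
instance (n : Int) (length : Int) (out : List String) : Decidable (Spec_generate_ternary_numbers n length out) := by unfold Spec_generate_ternary_numbers; infer_instance

-- ===== CLAIM (what is proved, stated in full; the proofs are below) =====
def Claim_equal_generate_ternary_numbers : Prop := ∀ (n : Int) (length : Int), Dom_generate_ternary_numbers n length → Spec_generate_ternary_numbers n length (generate_ternary_numbers n length)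

-- ===== LEMMAS AND PROOFS =====

-- canonical ternary digit characters of m, least-significant first ([] for 0)
def pvDigs : Nat → List Char
  | 0 => []
  | m + 1 => Char.ofNat (48 + (m + 1) % 3) :: pvDigs ((m + 1) / 3)
decreasing_by exact Nat.div_lt_self (Nat.succ_pos m) (by omega)

lemma pvDigs_zero : pvDigs 0 = [] := by rw [pvDigs]

lemma pvDigs_succ (m : Nat) : pvDigs (m + 1) = Char.ofNat (48 + (m + 1) % 3) :: pvDigs ((m + 1) / 3) := by
  rw [pvDigs]

lemma pvInc_digs : ∀ m : Nat, pvInc (pvDigs m) = pvDigs (m + 1) := by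
  intro m
  induction m using Nat.strong_induction_on with
  | _ m ih =>
    match m with
    | 0 =>
      rw [pvDigs_zero, show (0 + 1) = 1 from rfl, show (1 : Nat) = 0 + 1 from rfl, pvDigs_succ, pvDigs_zero]
      decide
    | m + 1 =>
      rw [pvDigs_succ]
      have h3 : (m + 1) % 3 = 0 ∨ (m + 1) % 3 = 1 ∨ (m + 1) % 3 = 2 := by omega
      rcases h3 with h | h | h
      · rw [h]
        rw [pvDigs_succ]
        have e1 : (m + 1 + 1) % 3 = 1 := by omega
        have e2 : (m + 1 + 1) / 3 = (m + 1) / 3 := by omega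
        rw [e1, e2, pvInc, if_neg (by decide)]
        congr 1
      · rw [h]
        rw [pvDigs_succ]
        have e1 : (m + 1 + 1) % 3 = 2 := by omega
        have e2 : (m + 1 + 1) / 3 = (m + 1) / 3 := by omega
        rw [e1, e2, pvInc, if_neg (by decide)]
        congr 1
      · rw [h]
        rw [pvDigs_succ]
        have e1 : (m + 1 + 1) % 3 = 0 := by omega
        have e2 : (m + 1 + 1) / 3 = (m + 1) / 3 + 1 := by omega
        rw [e1, e2, pvInc, if_pos (by decide)]
        have hdiv : (m + 1) / 3 < m + 1 := Nat.div_lt_self (Nat.succ_pos m) (by omega)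
        rw [ih _ hdiv]

lemma pvTernA_digs : ∀ (m : Nat) (acc : List Char), pvTernA (m : Int) acc = (pvDigs m).reverse ++ acc := by
  intro m
  induction m using Nat.strong_induction_on with
  | _ m ih =>
    intro acc
    match m with
    | 0 => rw [pvTernA]; simp [pvDigs_zero]
    | m + 1 =>
      rw [pvTernA]
      have hpos : (0 : Int) < ((m + 1 : Nat) : Int) := by positivity
      rw [dif_pos hpos]
      have hf : PySem.Int.floordiv ((m + 1 : Nat) : Int) 3 = (((m + 1) / 3 : Nat) : Int) := by
        exact_mod_cast PySem.Int.floordiv_natCast (m + 1) 3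
      have hm : PySem.Int.mod ((m + 1 : Nat) : Int) 3 = (((m + 1) % 3 : Nat) : Int) := by
        exact_mod_cast PySem.Int.mod_natCast (m + 1) 3
      rw [hf, hm]
      have hc : PySem.Int.toChars (((m + 1) % 3 : Nat) : Int) = [Char.ofNat (48 + (m + 1) % 3)] := by
        have h3 : (m + 1) % 3 = 0 ∨ (m + 1) % 3 = 1 ∨ (m + 1) % 3 = 2 := by omega
        rcases h3 with h | h | h <;> rw [h] <;> decide
      rw [hc, ih _ (Nat.div_lt_self (Nat.succ_pos m) (by omega))]
      rw [pvDigs_succ]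
      simp

lemma pvLoopB_digs (length : Int) : ∀ (k m : Nat),
    pvLoopB k (pvDigs m) length = (List.range k).map (fun j => pvRender (pvDigs (m + j)) length) := by
  intro k
  induction k with
  | zero => intro m; simp [pvLoopB]
  | succ k ih =>
    intro m
    rw [pvLoopB, pvInc_digs, ih (m + 1), List.range_succ_eq_map]
    simp only [List.map_cons, List.map_map, Nat.add_zero]
    congr 1
    apply List.map_congr_left
    intro j _
    simp only [Function.comp_apply]
    congr 2
    omega

-- ===== VERDICT (by name: the statement is the Claim_ definition above) =====
theorem generate_ternary_numbers_spec : Claim_equal_generate_ternary_numbers := by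
  intro n length _
  unfold Spec_generate_ternary_numbers generate_ternary_numbers generate_ternary_numbers_alt
  conv_rhs => rw [show ([] : List Char) = pvDigs 0 from pvDigs_zero.symm, pvLoopB_digs]
  rw [PySem.List.pyRange_one]
  simp only [Int.sub_zero, List.map_map]
  apply List.map_congr_left
  intro k _
  simp only [Function.comp_apply, Int.zero_add, Nat.zero_add]
  rw [pvTernA_digs k []]
  simp [pvRender]
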